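-- pv_equiv track=rewrite | github.com/ozzy2438/amazon-scraper | src/scraper/amazon_scraper.py | _clean_url
-- ===== SOURCE A (Python) =====
-- def _clean_url(url: str) -> str:
--     """Clean URL by removing escape characters and query parameters."""
--     if not url or url == "N/A":
--         return "N/A"
--
--     # Remove escape characters
--     url = url.replace("\\/", "/")
--
--     # Remove query parameters after first occurrence of /ref=
--     if "/ref=" in url:
--         url = url.split("/ref=")[0]
--
--     # Replace encoded characters
--     replacements = {
--         "%E2%80%91": "-",
--         "%E2%80%93": "-",
--         "%E2%80%94": "-",
--         "%20": " ",
--         "%2C": ",",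
--         "%2F": "/",
--         "%3A": ":",
--         "%3F": "?",
--         "%3D": "=",
--         "%26": "&"
--     }
--     for encoded, decoded in replacements.items():
--         url = url.replace(encoded, decoded)
--
--     return url
-- ===== SOURCE B (Python) =====
-- def _clean_url(url: str) -> str:
--     """Clean URL by removing escape characters and query parameters."""
--     if not url or url == "N/A":
--         return "N/A"
--
--     url = url.replace("\\/", "/")
--
--     if "/ref=" in url:
--         url = url.split("/ref=")[0]
--
--     # Single left-to-right pass: at each position emit the decoded character of
--     # the first matching encoded token (tokens are prefix-disjoint and never
--     # overlap, so one pass gives the same result as ten full replace() scans).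
--     tokens = (("%E2%80%91", "-"), ("%E2%80%93", "-"), ("%E2%80%94", "-"),
--               ("%20", " "), ("%2C", ","), ("%2F", "/"), ("%3A", ":"),
--               ("%3F", "?"), ("%3D", "="), ("%26", "&"))
--     out = []
--     i = 0
--     n = len(url)
--     while i < n:
--         for tok, ch in tokens:
--             if url.startswith(tok, i):
--                 out.append(ch)
--                 i += len(tok)
--                 break
--         else:
--             out.append(url[i])
--             i += 1
--     return "".join(out)
-- ===== Notes on version B (the rewrite author's own statement) =====
-- stated objective: alternative
-- what changed: The ten sequential full-string replace() passes over the decode table are replaced by a single left-to-right scan that, at each position, emits the decoded character of the first matching encoded token (the token table is prefix-disjoint and occurrences cannot overlap, so one pass gives identical output).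
import Mathlib
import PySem

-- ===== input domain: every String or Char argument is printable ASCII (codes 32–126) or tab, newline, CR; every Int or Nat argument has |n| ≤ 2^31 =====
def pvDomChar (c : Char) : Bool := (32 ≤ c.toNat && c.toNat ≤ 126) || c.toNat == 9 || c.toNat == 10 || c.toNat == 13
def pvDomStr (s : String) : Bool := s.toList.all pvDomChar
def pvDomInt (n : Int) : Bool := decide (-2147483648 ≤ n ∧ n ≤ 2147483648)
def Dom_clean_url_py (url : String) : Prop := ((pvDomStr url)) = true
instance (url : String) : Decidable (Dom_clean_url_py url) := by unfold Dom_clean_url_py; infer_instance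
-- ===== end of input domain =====

-- B replaces A's ten sequential full-string replace() passes by one left-to-right
-- scan emitting the decoded character of the first matching token at each position
-- (alternative decomposition; the guard, unescape and /ref= split are unchanged).

-- ===== PORT A =====
def replacementsA : List (String × String) :=
  [("%E2%80%91", "-"), ("%E2%80%93", "-"), ("%E2%80%94", "-"),
   ("%20", " "), ("%2C", ","), ("%2F", "/"), ("%3A", ":"),
   ("%3F", "?"), ("%3D", "="), ("%26", "&")]

def clean_url_py (url : String) : String :=
  if url = "" ∨ url = "N/A" then "N/A"
  else
    let u1 := PySem.Str.replace url "\\/" "/"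
    -- url.split("/ref=")[0]: the separator is nonempty, so split? is always `some`
    -- of a nonempty list and [0] is its head.
    let u2 := if PySem.Str.isIn "/ref=" u1 then
                ((PySem.Str.split? u1 "/ref=").getD []).headD ""
              else u1
    replacementsA.foldl (fun u p => PySem.Str.replace u p.1 p.2) u2

-- ===== PORT B =====
def tokensB : List (List Char × Char) :=
  [("%E2%80%91".toList, '-'), ("%E2%80%93".toList, '-'), ("%E2%80%94".toList, '-'),
   ("%20".toList, ' '), ("%2C".toList, ','), ("%2F".toList, '/'), ("%3A".toList, ':'),
   ("%3F".toList, '?'), ("%3D".toList, '='), ("%26".toList, '&')]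

-- Source B's while loop over positions: the first token matching at the current
-- position is emitted decoded and skipped, otherwise the character is copied.
def scanB : List Char → List Char
  | [] => []
  | c :: t =>
    match tokensB.find? (fun p => p.1.isPrefixOf (c :: t)) with
    | some (tok, d) => d :: scanB (t.drop (tok.length - 1))
    | none => c :: scanB t
termination_by l => l.length
decreasing_by
  all_goals simp

def clean_url_py_alt (url : String) : String :=
  if url = "" ∨ url = "N/A" then "N/A"
  else
    let u1 := PySem.Str.replace url "\\/" "/"
    let u2 := if PySem.Str.isIn "/ref=" u1 then
                ((PySem.Str.split? u1 "/ref=").getD []).headD ""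
              else u1
    -- "".join over one-character pieces is exactly the collected char list
    String.ofList (scanB u2.toList)

-- ===== PRECONDITION & SPEC =====
def Spec_clean_url_py (url : String) (out : String) : Prop := out = clean_url_py_alt url
instance (url : String) (out : String) : Decidable (Spec_clean_url_py url out) := by unfold Spec_clean_url_py; infer_instance

-- ===== CLAIM (what is proved, stated in full; the proofs are below) =====
def Claim_equal_clean_url_py : Prop := ∀ (url : String), Dom_clean_url_py url → Spec_clean_url_py url (clean_url_py url)

-- ===== LEMMAS AND PROOFS =====

-- a single replace() pass, written as structural left-to-right recursion
def rep1 (tok : List Char) (d : Char) : List Char → List Char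
  | [] => []
  | c :: t =>
    if tok.isPrefixOf (c :: t) then d :: rep1 tok d (t.drop (tok.length - 1))
    else c :: rep1 tok d t
termination_by l => l.length
decreasing_by
  all_goals simp

def stepFn (s : List Char) (p : List Char × Char) : List Char := rep1 p.1 p.2 s

theorem rep1_nil (tok : List Char) (d : Char) : rep1 tok d [] = [] := by
  rw [rep1.eq_def]

theorem rep1_pos (tok : List Char) (d : Char) (c : Char) (t : List Char)
    (h : tok <+: c :: t) :
    rep1 tok d (c :: t) = d :: rep1 tok d (t.drop (tok.length - 1)) := by
  rw [rep1.eq_def]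
  simp [List.isPrefixOf_iff_prefix, h]

theorem rep1_neg (tok : List Char) (d : Char) (c : Char) (t : List Char)
    (h : ¬ tok <+: c :: t) :
    rep1 tok d (c :: t) = c :: rep1 tok d t := by
  rw [rep1.eq_def]
  simp [List.isPrefixOf_iff_prefix, h]

theorem prefix_append_cases (l p x : List Char) (h : l <+: p ++ x) : l <+: p ∨ p <+: l := by
  rcases Nat.le_total l.length p.length with hle | hle
  · exact Or.inl (List.prefix_of_prefix_length_le h (List.prefix_append p x) hle)
  · exact Or.inr (List.prefix_of_prefix_length_le (List.prefix_append p x) h hle)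

-- a replace pass never creates a new occurrence of a token its output chars avoid
theorem notPrefix_rep1 (tok tok' : List Char) (d' : Char) (hd : d' ∉ tok) :
    ∀ (t p : List Char), ¬ tok <+: (p ++ t) → ¬ tok <+: (p ++ rep1 tok' d' t) := by
  intro t
  induction t with
  | nil => intro p h; simp only [rep1_nil]; exact h
  | cons c t ih =>
    intro p h
    by_cases hp : tok' <+: c :: t
    · rw [rep1_pos _ _ _ _ hp]
      intro hcon
      rcases prefix_append_cases _ _ _ hcon with h1 | h1
      · exact h (h1.trans (List.prefix_append p (c :: t)))
      · obtain ⟨s, hs⟩ := h1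
        subst hs
        rcases (List.prefix_append_right_inj p).mp hcon with hx
        cases s with
        | nil => exact h (by simp only [List.append_nil]; exact List.prefix_append p (c :: t))
        | cons a s' =>
          have : a = d' := (List.cons_prefix_cons.mp hx).1
          subst this
          exact hd (by simp)
    · rw [rep1_neg _ _ _ _ hp]
      have := ih (p ++ [c]) (by simpa using h)
      simp at this
      simpa using this

theorem rep1_append_block (tok : List Char) (d : Char) :
    ∀ (w x : List Char), (∀ j, j < w.length → ¬ tok <+: (w.drop j ++ x)) →
      rep1 tok d (w ++ x) = w ++ rep1 tok d x := by
  intro w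
  induction w with
  | nil => intro x _; rfl
  | cons a w ih =>
    intro x h
    have h0 : ¬ tok <+: a :: (w ++ x) := by simpa using h 0 (by simp)
    rw [List.cons_append, rep1_neg _ _ _ _ h0, ih x (fun j hj => by simpa using h (j+1) (by simpa))]
    simp

theorem rep1_self_prefix (tok : List Char) (d : Char) (h : tok ≠ []) (y : List Char) :
    rep1 tok d (tok ++ y) = d :: rep1 tok d y := by
  cases tok with
  | nil => exact absurd rfl h
  | cons a tok' =>
    rw [List.cons_append, rep1_pos _ _ _ _ (List.prefix_append _ _)]
    simp

theorem foldl_step_nil (T : List (List Char × Char)) : T.foldl stepFn [] = [] := by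
  induction T with
  | nil => rfl
  | cons q T ih => simp [stepFn, rep1_nil, ih]

theorem foldl_cons_of_no_match (T : List (List Char × Char))
    (Hd : ∀ p ∈ T, ∀ q ∈ T, q.2 ∉ p.1) :
    ∀ (c : Char) (x : List Char), (∀ p ∈ T, ¬ p.1 <+: c :: x) →
      T.foldl stepFn (c :: x) = c :: T.foldl stepFn x := by
  induction T with
  | nil => intro c x _; rfl
  | cons q T ih =>
    intro c x h
    have hq : ¬ q.1 <+: c :: x := h q (by simp)
    have hstep : stepFn (c :: x) q = c :: rep1 q.1 q.2 x := rep1_neg _ _ _ _ hq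
    rw [List.foldl_cons, hstep]
    rw [ih (fun p hp r hr => Hd p (by simp [hp]) r (by simp [hr])) c (rep1 q.1 q.2 x)
        (fun p hp => by
          have := notPrefix_rep1 p.1 q.1 q.2 (Hd p (by simp [hp]) q (by simp)) x [c]
          simp only [List.singleton_append] at this
          exact this (h p (by simp [hp])))]
    simp [stepFn]

theorem foldl_cons_of_fresh (T : List (List Char × Char)) (d : Char)
    (Hd : ∀ p ∈ T, d ∉ p.1 ∧ p.1 ≠ []) :
    ∀ y, T.foldl stepFn (d :: y) = d :: T.foldl stepFn y := by
  induction T with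
  | nil => intro y; rfl
  | cons q T ih =>
    intro y
    have hq : ¬ q.1 <+: d :: y := by
      intro hcon
      rcases Hd q (by simp) with ⟨hd1, hd2⟩
      cases hh : q.1 with
      | nil => exact hd2 hh
      | cons a s =>
        rw [hh] at hcon
        have := (List.cons_prefix_cons.mp hcon).1
        subst this
        exact hd1 (by simp [hh])
    have hstep : stepFn (d :: y) q = d :: rep1 q.1 q.2 y := rep1_neg _ _ _ _ hq
    rw [List.foldl_cons, hstep]
    exact ih (fun p hp => Hd p (by simp [hp])) _

theorem foldl_block (T : List (List Char × Char)) (w : List Char)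
    (Hw : ∀ p ∈ T, ∀ j, j < w.length → ∀ x, ¬ p.1 <+: (w.drop j ++ x)) :
    ∀ r, T.foldl stepFn (w ++ r) = w ++ T.foldl stepFn r := by
  induction T with
  | nil => intro r; rfl
  | cons q T ih =>
    intro r
    have hstep : stepFn (w ++ r) q = w ++ rep1 q.1 q.2 r :=
      rep1_append_block _ _ _ _ (fun j hj => Hw q (by simp) j hj r)
    rw [List.foldl_cons, hstep]
    exact ih (fun p hp => Hw p (by simp [hp])) _

-- facts about the concrete token table
theorem tok_len : ∀ p ∈ tokensB, 2 ≤ p.1.length := by decide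
theorem tok_chars : ∀ p ∈ tokensB, ∀ q ∈ tokensB, q.2 ∉ p.1 := by decide
theorem tok_nopfx : ∀ p ∈ tokensB, ∀ q ∈ tokensB, p.1 ≠ q.1 → ¬(p.1 <+: q.1) ∧ ¬(q.1 <+: p.1) := by decide
theorem tok_straddle : ∀ p ∈ tokensB, ∀ q ∈ tokensB, ∀ j < p.1.length, 0 < j →
    ¬(q.1 <+: p.1.drop j) ∧ ¬(p.1.drop j <+: q.1) := by decide

theorem main_fold_eq_scan : ∀ (n : Nat) (l : List Char), l.length ≤ n →
    tokensB.foldl stepFn l = scanB l := by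
  intro n
  induction n with
  | zero =>
    intro l hl
    have : l = [] := List.length_eq_zero_iff.mp (Nat.le_zero.mp hl)
    subst this
    rw [foldl_step_nil, scanB.eq_def]
  | succ n ih =>
    intro l hl
    cases l with
    | nil => rw [foldl_step_nil, scanB.eq_def]
    | cons c t =>
      cases hfind : tokensB.find? (fun p => p.1.isPrefixOf (c :: t)) with
      | none =>
        have hno : ∀ p ∈ tokensB, ¬ p.1 <+: c :: t := by
          intro p hp
          have := List.find?_eq_none.mp hfind p hp
          simpa [List.isPrefixOf_iff_prefix] using this
        rw [foldl_cons_of_no_match tokensB tok_chars c t hno,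
            ih t (Nat.le_of_succ_le_succ hl)]
        conv_rhs => rw [scanB.eq_def]
        simp [hfind]
      | some pr =>
        obtain ⟨tok, d⟩ := pr
        obtain ⟨hpred, T₁, T₂, hTL, hT₁⟩ := List.find?_eq_some_iff_append.mp hfind
        have htok : tok <+: c :: t := List.isPrefixOf_iff_prefix.mp hpred
        have htokmem : (tok, d) ∈ tokensB := by rw [hTL]; simp
        have htoklen : 2 ≤ tok.length := tok_len (tok, d) htokmem
        have htokne : tok ≠ [] := by
          intro hcon; rw [hcon] at htoklen; simp at htoklen
        obtain ⟨r, hr⟩ := htok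
        have hmemT₁ : ∀ p ∈ T₁, p ∈ tokensB := by
          intro p hp; rw [hTL]; simp [hp]
        have hmemT₂ : ∀ p ∈ T₂, p ∈ tokensB := by
          intro p hp; rw [hTL]; simp [hp]
        -- members of T₁ never match anywhere inside the tok-block, whatever follows
        have HwT₁ : ∀ p ∈ T₁, ∀ j, j < tok.length → ∀ x, ¬ p.1 <+: (tok.drop j ++ x) := by
          intro p hp j hj x hcon
          have hpfail : ¬ p.1 <+: c :: t := by
            have h2 : p.1.isPrefixOf (c :: t) = false := by simpa using hT₁ p hp
            exact fun hc => absurd h2 (by simp [List.isPrefixOf_iff_prefix.mpr hc])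
          rcases Nat.eq_zero_or_pos j with hj0 | hj0
          · subst hj0
            simp only [List.drop_zero] at hcon
            have hne : p.1 ≠ tok := by
              intro he; rw [he] at hpfail; exact hpfail ⟨r, hr⟩
            rcases prefix_append_cases _ _ _ hcon with h1 | h1
            · exact (tok_nopfx p (hmemT₁ p hp) (tok, d) htokmem hne).1 h1
            · exact (tok_nopfx p (hmemT₁ p hp) (tok, d) htokmem hne).2 h1
          · rcases prefix_append_cases _ _ _ hcon with h1 | h1
            · exact (tok_straddle (tok, d) htokmem p (hmemT₁ p hp) j hj hj0).1 h1
            · exact (tok_straddle (tok, d) htokmem p (hmemT₁ p hp) j hj hj0).2 h1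
        have HfreshT₂ : ∀ p ∈ T₂, d ∉ p.1 ∧ p.1 ≠ [] := by
          intro p hp
          refine ⟨tok_chars p (hmemT₂ p hp) (tok, d) htokmem, ?_⟩
          intro hcon
          have := tok_len p (hmemT₂ p hp)
          rw [hcon] at this; simp at this
        have hrlen : r.length ≤ n := by
          have hlen : tok.length + r.length = t.length + 1 := by
            have := congrArg List.length hr
            simpa using this
          have hl' : t.length + 1 ≤ n + 1 := by simpa using hl
          omega
        calc tokensB.foldl stepFn (c :: t)
            = T₂.foldl stepFn (stepFn (T₁.foldl stepFn (c :: t)) (tok, d)) := by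
              rw [hTL]; simp
          _ = T₂.foldl stepFn (stepFn (tok ++ T₁.foldl stepFn r) (tok, d)) := by
              rw [← hr, foldl_block T₁ tok HwT₁ r]
          _ = T₂.foldl stepFn (d :: rep1 tok d (T₁.foldl stepFn r)) := by
              rw [show stepFn (tok ++ T₁.foldl stepFn r) (tok, d)
                    = rep1 tok d (tok ++ T₁.foldl stepFn r) from rfl,
                  rep1_self_prefix tok d htokne]
          _ = d :: T₂.foldl stepFn (rep1 tok d (T₁.foldl stepFn r)) := by
              rw [foldl_cons_of_fresh T₂ d HfreshT₂]
          _ = d :: tokensB.foldl stepFn r := by rw [hTL]; simp [stepFn]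
          _ = d :: scanB r := by rw [ih r hrlen]
          _ = scanB (c :: t) := by
              conv_rhs => rw [scanB.eq_def]
              simp only [hfind]
              have : t.drop (tok.length - 1) = r := by
                cases tok with
                | nil => exact absurd rfl htokne
                | cons a tok' =>
                  have : t = tok' ++ r := by
                    simpa using congrArg List.tail hr.symm
                  rw [this]
                  simp
              rw [this]

-- fuel lemma for PySem's replace
theorem replace_go_eq (tok : List Char) (d : Char) (htok : tok ≠ []) :
    ∀ (fuel : Nat) (l acc : List Char), l.length ≤ fuel →
      PySem.Chars.replace.go tok [d] fuel l acc = acc.reverse ++ rep1 tok d l := by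
  intro fuel
  induction fuel with
  | zero =>
    intro l acc hl
    have : l = [] := List.length_eq_zero_iff.mp (Nat.le_zero.mp hl)
    subst this
    rw [PySem.Chars.replace.go.eq_1, rep1_nil]
  | succ n ih =>
    intro l acc hl
    cases l with
    | nil =>
      rw [PySem.Chars.replace.go.eq_2 _ _ _ _ (by omega), rep1_nil]
      simp
    | cons c t =>
      rw [PySem.Chars.replace.go.eq_3]
      by_cases hp : tok.isPrefixOf (c :: t)
      · have hpfx : tok <+: c :: t := List.isPrefixOf_iff_prefix.mp hp
        have hdrop : (c :: t).drop tok.length = t.drop (tok.length - 1) := by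
          cases tok with
          | nil => exact absurd rfl htok
          | cons a tok' => simp
        have hdlen : (t.drop (tok.length - 1)).length ≤ n := by
          have h1 : t.length ≤ n := by simpa using hl
          simp only [List.length_drop]
          omega
        simp only [hp, if_true, hdrop]
        rw [ih _ _ hdlen, rep1_pos _ _ _ _ hpfx]
        simp
      · simp only [hp, if_false, Bool.false_eq_true]
        rw [ih t (c :: acc) (by simpa using hl),
            rep1_neg _ _ _ _ (fun hc => hp (List.isPrefixOf_iff_prefix.mpr hc))]
        simp

theorem replace_eq_rep1 (tok : List Char) (d : Char) (htok : tok ≠ []) (l : List Char) :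
    PySem.Chars.replace l tok [d] = rep1 tok d l := by
  rw [PySem.Chars.replace]
  simp [List.isEmpty_iff, htok, replace_go_eq tok d htok l.length l [] le_rfl]

theorem decode_eq (s : String) :
    replacementsA.foldl (fun u p => PySem.Str.replace u p.1 p.2) s = String.ofList (scanB s.toList) := by
  apply String.ext
  simp only [replacementsA, List.foldl_cons, List.foldl_nil, PySem.Str.toList_replace,
    String.toList_ofList,
    show ("%E2%80%91" : String).toList = ['%','E','2','%','8','0','%','9','1'] from rfl,
    show ("%E2%80%93" : String).toList = ['%','E','2','%','8','0','%','9','3'] from rfl,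
    show ("%E2%80%94" : String).toList = ['%','E','2','%','8','0','%','9','4'] from rfl,
    show ("%20" : String).toList = ['%','2','0'] from rfl,
    show ("%2C" : String).toList = ['%','2','C'] from rfl,
    show ("%2F" : String).toList = ['%','2','F'] from rfl,
    show ("%3A" : String).toList = ['%','3','A'] from rfl,
    show ("%3F" : String).toList = ['%','3','F'] from rfl,
    show ("%3D" : String).toList = ['%','3','D'] from rfl,
    show ("%26" : String).toList = ['%','2','6'] from rfl,
    show ("-" : String).toList = ['-'] from rfl,
    show (" " : String).toList = [' '] from rfl,
    show ("," : String).toList = [','] from rfl,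
    show ("/" : String).toList = ['/'] from rfl,
    show (":" : String).toList = [':'] from rfl,
    show ("?" : String).toList = ['?'] from rfl,
    show ("=" : String).toList = ['='] from rfl,
    show ("&" : String).toList = ['&'] from rfl]
  have key : tokensB.foldl stepFn s.toList = scanB s.toList :=
    main_fold_eq_scan s.toList.length s.toList le_rfl
  simp only [tokensB, List.foldl_cons, List.foldl_nil, stepFn,
    show ("%E2%80%91" : String).toList = ['%','E','2','%','8','0','%','9','1'] from rfl,
    show ("%E2%80%93" : String).toList = ['%','E','2','%','8','0','%','9','3'] from rfl,
    show ("%E2%80%94" : String).toList = ['%','E','2','%','8','0','%','9','4'] from rfl,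
    show ("%20" : String).toList = ['%','2','0'] from rfl,
    show ("%2C" : String).toList = ['%','2','C'] from rfl,
    show ("%2F" : String).toList = ['%','2','F'] from rfl,
    show ("%3A" : String).toList = ['%','3','A'] from rfl,
    show ("%3F" : String).toList = ['%','3','F'] from rfl,
    show ("%3D" : String).toList = ['%','3','D'] from rfl,
    show ("%26" : String).toList = ['%','2','6'] from rfl] at key
  rw [replace_eq_rep1 _ '-' (by decide), replace_eq_rep1 _ '-' (by decide),
      replace_eq_rep1 _ '-' (by decide), replace_eq_rep1 _ ' ' (by decide),
      replace_eq_rep1 _ ',' (by decide), replace_eq_rep1 _ '/' (by decide),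
      replace_eq_rep1 _ ':' (by decide), replace_eq_rep1 _ '?' (by decide),
      replace_eq_rep1 _ '=' (by decide), replace_eq_rep1 _ '&' (by decide)]
  exact key

-- ===== VERDICT (by name: the statement is the Claim_ definition above) =====
theorem clean_url_py_spec : Claim_equal_clean_url_py := by
  intro url _
  unfold Spec_clean_url_py clean_url_py clean_url_py_alt
  by_cases h : url = "" ∨ url = "N/A"
  · simp [h]
  · simp only [if_neg h]
    exact decode_eq _
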